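-- pv_equiv track=rewrite | github.com/prideicker/FluentYTDL | src/fluentytdl/ui/components/download_card.py | _next_lower_height
-- ===== SOURCE A (Python) =====
-- def _next_lower_height(current: int) -> int | None:
--     ladder = [2160, 1440, 1080, 720, 480, 360]
--     try:
--         i = ladder.index(current)
--     except ValueError:
--         # pick nearest lower
--         lower = [h for h in ladder if h < current]
--         return lower[0] if lower else None
--     return ladder[i + 1] if i + 1 < len(ladder) else None
-- ===== SOURCE B (Python) =====
-- def _next_lower_height(current: int) -> int | None:
--     for h in (2160, 1440, 1080, 720, 480, 360):
--         if h < current: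
--             return h
--     return None
-- ===== Notes on version B (the rewrite author's own statement) =====
-- stated objective: simpler
-- what changed: Both of A's branches reduce to 'the largest ladder value strictly below current'; B replaces the index lookup, try/except and filter-comprehension with a single scan of the descending ladder returning the first value < current.
import Mathlib
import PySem

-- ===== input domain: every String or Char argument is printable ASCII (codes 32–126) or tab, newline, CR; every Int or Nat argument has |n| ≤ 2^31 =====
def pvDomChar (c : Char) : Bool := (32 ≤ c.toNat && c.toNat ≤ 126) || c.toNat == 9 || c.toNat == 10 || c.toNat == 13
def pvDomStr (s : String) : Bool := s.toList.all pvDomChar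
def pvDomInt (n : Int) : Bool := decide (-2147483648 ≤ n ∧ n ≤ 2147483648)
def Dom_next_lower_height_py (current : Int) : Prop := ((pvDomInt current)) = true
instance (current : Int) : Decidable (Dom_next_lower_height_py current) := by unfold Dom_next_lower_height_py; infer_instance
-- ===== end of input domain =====

-- B replaces A's index-lookup / try-except / filter-comprehension with one scan of the
-- descending ladder returning the first value < current (objective: simpler).
-- ===== PORT A =====
def pvLadder : List Int := [2160, 1440, 1080, 720, 480, 360]

def next_lower_height_py (current : Int) : Option Int :=
  match PySem.List.index? pvLadder current with
  | none =>
      -- except ValueError branch: lower = [h for h in ladder if h < current]; lower[0] if lower else None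
      match pvLadder.filter (fun h => decide (h < current)) with
      | [] => none
      | x :: _ => some x
  | some i =>
      -- return ladder[i + 1] if i + 1 < len(ladder) else None  (pyGet? is some under the guard)
      if (i : Int) + 1 < (pvLadder.length : Int) then PySem.List.pyGet? pvLadder ((i : Int) + 1) else none

-- ===== PORT B =====
def pvScan (current : Int) : List Int → Option Int
  | [] => none
  | h :: t => if h < current then some h else pvScan current t

def next_lower_height_py_alt (current : Int) : Option Int :=
  pvScan current [2160, 1440, 1080, 720, 480, 360]

-- ===== PRECONDITION & SPEC =====
def Spec_next_lower_height_py (current : Int) (out : Option Int) : Prop := out = next_lower_height_py_alt current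
instance (current : Int) (out : Option Int) : Decidable (Spec_next_lower_height_py current out) := by unfold Spec_next_lower_height_py; infer_instance

-- ===== CLAIM (what is proved, stated in full; the proofs are below) =====
def Claim_equal_next_lower_height_py : Prop := ∀ (current : Int), Dom_next_lower_height_py current → Spec_next_lower_height_py current (next_lower_height_py current)

-- ===== LEMMAS AND PROOFS =====

-- ===== VERDICT (by name: the statement is the Claim_ definition above) =====
theorem next_lower_height_py_spec : Claim_equal_next_lower_height_py := by
  intro current _
  unfold Spec_next_lower_height_py next_lower_height_py next_lower_height_py_alt
  by_cases h1 : current = 2160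
  · subst h1; decide
  by_cases h2 : current = 1440
  · subst h2; decide
  by_cases h3 : current = 1080
  · subst h3; decide
  by_cases h4 : current = 720
  · subst h4; decide
  by_cases h5 : current = 480
  · subst h5; decide
  by_cases h6 : current = 360
  · subst h6; decide
  have hidx : PySem.List.index? pvLadder current = none := by
    rw [PySem.List.index?_eq_none_iff]
    simp [pvLadder]
    omega
  rw [hidx]
  by_cases c1 : (2160 : Int) < current <;> by_cases c2 : (1440 : Int) < current <;>
    by_cases c3 : (1080 : Int) < current <;> by_cases c4 : (720 : Int) < current <;>
    by_cases c5 : (480 : Int) < current <;> by_cases c6 : (360 : Int) < current <;>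
    simp [pvLadder, pvScan, c1, c2, c3, c4, c5, c6, List.filter] <;> omega
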